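-- pv_equiv track=rewrite | github.com/camilaraquel2016/ADS-IFPI | ALGORITMOS_ADS_2025/BEECROWD/competicao01/3060_parcelas.py | obter_parcelas
-- ===== SOURCE A (Python) =====
-- def obter_quociente(dividendo, divisor):
--     return dividendo // divisor
--
-- def obter_resto(dividendo, divisor):
--     return dividendo % divisor
--
-- def obter_parcelas(valor_da_compra, qtd_parcelas):
--     parcela_base = obter_quociente(valor_da_compra, qtd_parcelas)
--     valor_restante_a_pagar_das_parcelas = obter_resto(valor_da_compra, qtd_parcelas)
--
--     parcelas = []
--
--     for i in range(qtd_parcelas):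
--         if valor_restante_a_pagar_das_parcelas > 0:
--             parcela = parcela_base + 1
--             valor_restante_a_pagar_das_parcelas -= 1
--         else:
--             parcela = parcela_base
--
--         parcelas.append(parcela)
--
--     return parcelas
-- ===== SOURCE B (Python) =====
-- def obter_parcelas(valor_da_compra, qtd_parcelas):
--     parcela_base = valor_da_compra // qtd_parcelas
--     resto = valor_da_compra % qtd_parcelas
--     return [parcela_base + 1] * resto + [parcela_base] * (qtd_parcelas - resto)
-- ===== Notes on version B (the rewrite author's own statement) =====
-- stated objective: simpler
-- what changed: Replaces the per-installment loop with a decrementing remainder counter by direct construction of the result as two homogeneous runs: resto copies of base+1 followed by qtd_parcelas-resto copies of base.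
import Mathlib
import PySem

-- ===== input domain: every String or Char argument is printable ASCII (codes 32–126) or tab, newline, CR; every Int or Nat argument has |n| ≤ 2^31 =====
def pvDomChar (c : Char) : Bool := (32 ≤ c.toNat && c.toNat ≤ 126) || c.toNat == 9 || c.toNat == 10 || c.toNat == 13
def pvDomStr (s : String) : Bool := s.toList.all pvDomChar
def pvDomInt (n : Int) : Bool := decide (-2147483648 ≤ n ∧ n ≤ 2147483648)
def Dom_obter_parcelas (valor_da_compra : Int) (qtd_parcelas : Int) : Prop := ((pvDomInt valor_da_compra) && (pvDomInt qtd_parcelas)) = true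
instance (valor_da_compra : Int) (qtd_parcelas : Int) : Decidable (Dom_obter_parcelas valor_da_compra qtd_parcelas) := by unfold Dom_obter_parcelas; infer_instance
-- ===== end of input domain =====

-- B replaces the per-installment loop with direct construction of two homogeneous runs (simpler).

-- ===== PORT A =====
def obter_quociente (dividendo : Int) (divisor : Int) : Int :=
  PySem.Int.floordiv dividendo divisor

def obter_resto (dividendo : Int) (divisor : Int) : Int :=
  PySem.Int.mod dividendo divisor

def obter_parcelas (valor_da_compra : Int) (qtd_parcelas : Int) : List Int :=
  let parcela_base := obter_quociente valor_da_compra qtd_parcelas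
  let valor_restante := obter_resto valor_da_compra qtd_parcelas
  let st := (PySem.List.pyRange 0 qtd_parcelas 1).foldl
    (fun (s : Int × List Int) _ =>
      if s.1 > 0 then (s.1 - 1, s.2 ++ [parcela_base + 1])
      else (s.1, s.2 ++ [parcela_base]))
    (valor_restante, [])
  st.2

-- ===== PORT B =====
def obter_parcelas_alt (valor_da_compra : Int) (qtd_parcelas : Int) : List Int :=
  let parcela_base := PySem.Int.floordiv valor_da_compra qtd_parcelas
  let resto := PySem.Int.mod valor_da_compra qtd_parcelas
  List.replicate resto.toNat (parcela_base + 1)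
    ++ List.replicate (qtd_parcelas - resto).toNat parcela_base

-- ===== PRECONDITION & SPEC =====
-- A (and B) raise ZeroDivisionError when qtd_parcelas = 0.
def Pre_obter_parcelas (valor_da_compra : Int) (qtd_parcelas : Int) : Prop :=
  qtd_parcelas ≠ 0
instance (valor_da_compra : Int) (qtd_parcelas : Int) : Decidable (Pre_obter_parcelas valor_da_compra qtd_parcelas) := by unfold Pre_obter_parcelas; infer_instance

def pvWitness_obter_parcelas : Int × Int := (100, 3)

def Spec_obter_parcelas (valor_da_compra : Int) (qtd_parcelas : Int) (out : List Int) : Prop := out = obter_parcelas_alt valor_da_compra qtd_parcelas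
instance (valor_da_compra : Int) (qtd_parcelas : Int) (out : List Int) : Decidable (Spec_obter_parcelas valor_da_compra qtd_parcelas out) := by unfold Spec_obter_parcelas; infer_instance

-- ===== CLAIM (what is proved, stated in full; the proofs are below) =====
def Claim_equal_obter_parcelas : Prop := ∀ (valor_da_compra : Int) (qtd_parcelas : Int), Dom_obter_parcelas valor_da_compra qtd_parcelas → Pre_obter_parcelas valor_da_compra qtd_parcelas → Spec_obter_parcelas valor_da_compra qtd_parcelas (obter_parcelas valor_da_compra qtd_parcelas)

-- ===== LEMMAS AND PROOFS =====

-- A's loop, run over any index list of length n with remainder 0 ≤ r ≤ n,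
-- appends r copies of b+1 then n - r copies of b.
theorem pv_loop_shape (b : Int) (l : List Int) (r : Int) (acc : List Int)
    (h0 : 0 ≤ r) (h1 : r ≤ l.length) :
    (l.foldl
      (fun (s : Int × List Int) _ =>
        if s.1 > 0 then (s.1 - 1, s.2 ++ [b + 1])
        else (s.1, s.2 ++ [b]))
      (r, acc)).2
    = acc ++ List.replicate r.toNat (b + 1) ++ List.replicate (l.length - r.toNat) b := by
  induction l generalizing r acc with
  | nil =>
    have : r = 0 := le_antisymm (by simpa using h1) h0
    simp [this]
  | cons x xs ih =>
    simp only [List.foldl_cons]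
    have hlen : r.toNat ≤ xs.length + 1 := by
      simp at h1; omega
    by_cases hr : r > 0
    · rw [if_pos hr]
      rw [ih (r - 1) (acc ++ [b + 1]) (by omega) (by simp at h1 ⊢; omega)]
      have h2 : r.toNat = (r - 1).toNat + 1 := by omega
      have h3 : xs.length - (r - 1).toNat = xs.length + 1 - r.toNat := by omega
      rw [h2, h3, List.replicate_succ]
      simp
      omega
    · rw [if_neg hr]
      have hr0 : r = 0 := le_antisymm (by omega) h0
      subst hr0
      rw [ih 0 (acc ++ [b]) le_rfl (by simp)]
      simp [List.replicate_succ]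

-- ===== VERDICT (by name: the statement is the Claim_ definition above) =====
theorem obter_parcelas_spec : Claim_equal_obter_parcelas := by
  intro v q _ hq
  unfold Spec_obter_parcelas obter_parcelas obter_parcelas_alt obter_quociente obter_resto
  by_cases hpos : 0 < q
  · have hr0 : 0 ≤ PySem.Int.mod v q := PySem.Int.mod_nonneg v hpos
    have hrlt : PySem.Int.mod v q < q := PySem.Int.mod_lt v hpos
    rw [pv_loop_shape _ _ _ _ hr0
      (by rw [PySem.List.length_pyRange_one]; omega)]
    rw [PySem.List.length_pyRange_one]
    have hlen : ((q - 0).toNat - (PySem.Int.mod v q).toNat)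
        = (q - PySem.Int.mod v q).toNat := by omega
    rw [hlen]
    simp
  · have hq' : q ≠ 0 := hq
    have hneg : q < 0 := by omega
    obtain ⟨hb1, hb2⟩ := PySem.Int.mod_neg_bounds v hneg
    rw [PySem.List.pyRange_one_eq_nil (by omega)]
    have h1 : (PySem.Int.mod v q).toNat = 0 := by omega
    have h2 : (q - PySem.Int.mod v q).toNat = 0 := by omega
    simp [h1, h2]
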